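-- pv_equiv track=rewrite | github.com/mohos26/Challenges | not complete/Movie Theater Seating.py | group_seats
-- ===== SOURCE A (Python) =====
-- def group_seats(lst, n):
--     for i in range(len(lst)):
--         nn = 0
--         lst2 = []
--         for j in lst[i]:
--             if j == 0:
--                 nn += 1
--             else:
--                 lst2.append(nn)
--                 nn = 0
--         else:
--             lst2.append(nn)
--         for j in lst2:
--             if j >= n:
--                 return i+1
--     return 0
-- ===== SOURCE B (Python) =====
-- def group_seats(lst, n):
--     # substring search: a row has n consecutive empty seats iff '0'*n occurs in its '0'/'X' picture
--     # (the n <= len(row) guard skips rows a run of n cannot fit in, and avoids building a huge needle)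
--     return next((i + 1 for i, row in enumerate(lst)
--                  if n <= len(row) and '0' * n in ''.join('0' if seat == 0 else 'X' for seat in row)), 0)
-- ===== Notes on version B (the rewrite author's own statement) =====
-- stated objective: idiomatic
-- what changed: B replaces A's per-row run-length list plus second scan with a substring test: map each row to a '0'/'X' string and check whether '0'*n occurs in it (skipping rows shorter than n), selecting the first matching row with next()/enumerate.
import Mathlib
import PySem

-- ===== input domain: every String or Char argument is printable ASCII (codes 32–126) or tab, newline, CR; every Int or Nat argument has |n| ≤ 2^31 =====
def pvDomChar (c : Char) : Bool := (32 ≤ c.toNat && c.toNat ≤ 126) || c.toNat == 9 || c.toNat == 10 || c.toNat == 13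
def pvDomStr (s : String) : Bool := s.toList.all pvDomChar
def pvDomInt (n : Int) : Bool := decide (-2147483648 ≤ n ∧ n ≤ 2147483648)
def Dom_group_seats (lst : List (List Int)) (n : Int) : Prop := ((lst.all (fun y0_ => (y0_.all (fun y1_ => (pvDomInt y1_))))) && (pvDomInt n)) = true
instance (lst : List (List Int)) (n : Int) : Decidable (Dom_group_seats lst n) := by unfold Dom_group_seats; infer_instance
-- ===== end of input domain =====

-- One honest line: B tests whether '0'*n is a substring of each row's '0'/'X' picture (first hit via
-- enumerate/next) instead of A's run-length list plus second scan; same return value everywhere.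

-- ===== PORT A =====
-- inner fold of A: state (nn, lst2); appends completed runs, counts current run
def pvAstep (st : Int × List Int) (j : Int) : Int × List Int :=
  if j == 0 then (st.1 + 1, st.2) else (0, st.2 ++ [st.1])

-- after the for-else, lst2.append(nn); then scan lst2 for j >= n (early return)
def pvArowHit (row : List Int) (n : Int) : Bool :=
  let st := row.foldl pvAstep (0, [])
  (st.2 ++ [st.1]).any (fun j => decide (n ≤ j))

def pvAgo (lst : List (List Int)) (n : Int) (i : Int) : Int :=
  match lst with
  | [] => 0
  | row :: rest => if pvArowHit row n then i + 1 else pvAgo rest n (i + 1)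

def group_seats (lst : List (List Int)) (n : Int) : Int := pvAgo lst n 0

-- ===== PORT B =====
-- ''.join('0' if seat == 0 else 'X' for seat in row), as its character list
def pvRowPic (row : List Int) : List Char :=
  row.map (fun seat => if seat == 0 then '0' else 'X')

-- '0' * n (empty for n <= 0, exactly as in Python); 'needle in picture' is PySem.Chars.isIn;
-- the short-circuit 'n <= len(row) and …' is the && guard;
-- next((i+1 for i, row in enumerate(lst) if ...), 0) is findIdx? on the rows
def pvBrowHit (row : List Int) (n : Int) : Bool :=
  decide (n ≤ (row.length : Int)) && PySem.Chars.isIn (List.replicate n.toNat '0') (pvRowPic row)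

def group_seats_alt (lst : List (List Int)) (n : Int) : Int :=
  match lst.findIdx? (fun row => pvBrowHit row n) with
  | some i => (i : Int) + 1
  | none => 0

-- ===== PRECONDITION & SPEC =====
def Spec_group_seats (lst : List (List Int)) (n : Int) (out : Int) : Prop := out = group_seats_alt lst n
instance (lst : List (List Int)) (n : Int) (out : Int) : Decidable (Spec_group_seats lst n out) := by unfold Spec_group_seats; infer_instance

-- ===== CLAIM (what is proved, stated in full; the proofs are below) =====
def Claim_equal_group_seats : Prop := ∀ (lst : List (List Int)) (n : Int), Dom_group_seats lst n → Spec_group_seats lst n (group_seats lst n)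

-- ===== LEMMAS AND PROOFS =====

-- a block of '0's that is a prefix of l1 ++ 'X' :: l2 is already a prefix of l1
theorem pv_rep_prefix (k : Nat) : ∀ (l1 l2 : List Char),
    List.replicate k '0' <+: l1 ++ 'X' :: l2 → List.replicate k '0' <+: l1 := by
  induction k with
  | zero => intro l1 l2 _; simp
  | succ k ih =>
    intro l1 l2 h
    cases l1 with
    | nil =>
      rw [List.replicate_succ, List.nil_append, List.cons_prefix_cons] at h
      exact absurd h.1 (by decide)
    | cons a l1 =>
      rw [List.replicate_succ, List.cons_append, List.cons_prefix_cons] at h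
      rw [List.replicate_succ, List.cons_prefix_cons]
      exact ⟨h.1, ih l1 l2 h.2⟩

-- a nonempty block of '0's inside l1 ++ 'X' :: l2 lies wholly in l1 or wholly in l2
theorem pv_rep_split (k : Nat) (hk : 0 < k) : ∀ (l1 l2 : List Char),
    (List.replicate k '0' <:+: l1 ++ 'X' :: l2 ↔
      List.replicate k '0' <:+: l1 ∨ List.replicate k '0' <:+: l2) := by
  intro l1 l2
  constructor
  · induction l1 with
    | nil =>
      intro h
      rw [List.nil_append, List.infix_cons_iff] at h
      rcases h with h | h
      · obtain ⟨t, ht⟩ := h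
        cases k with
        | zero => omega
        | succ k =>
          rw [List.replicate_succ, List.cons_append, List.cons.injEq] at ht
          exact absurd ht.1 (by decide)
      · exact Or.inr h
    | cons a l1 ih =>
      intro h
      rw [List.cons_append, List.infix_cons_iff] at h
      rcases h with h | h
      · cases k with
        | zero => omega
        | succ k =>
          rw [List.replicate_succ, List.cons_prefix_cons] at h
          left
          have hp : List.replicate (k + 1) '0' <+: '0' :: l1 := by
            rw [List.replicate_succ]
            exact List.cons_prefix_cons.mpr ⟨rfl, pv_rep_prefix k l1 l2 h.2⟩
          exact h.1 ▸ hp.isInfix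
      · rcases ih h with h' | h'
        · exact Or.inl (h'.trans (List.suffix_cons a l1).isInfix)
        · exact Or.inr h'
  · rintro (h | h)
    · exact h.trans ⟨[], 'X' :: l2, by simp⟩
    · exact h.trans ⟨l1 ++ ['X'], [], by simp⟩

theorem pv_rep_infix_rep (k m : Nat) :
    List.replicate k '0' <:+: List.replicate m '0' ↔ k ≤ m := by
  constructor
  · intro h
    have := h.sublist.length_le
    simpa using this
  · intro h
    refine ⟨[], List.replicate (m - k) '0', ?_⟩
    rw [List.nil_append, ← List.replicate_add, Nat.add_sub_cancel' h]

-- A's run-list counter stays nonnegative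
theorem pv_nn_nonneg (row : List Int) : ∀ (nn : Int) (lst2 : List Int), 0 ≤ nn →
    0 ≤ (row.foldl pvAstep (nn, lst2)).1 := by
  induction row with
  | nil => intro nn lst2 h; simpa using h
  | cons j row ih =>
    intro nn lst2 h
    by_cases hj : j = 0
    · simpa [List.foldl, pvAstep, hj] using ih (nn + 1) lst2 (by omega)
    · simpa [List.foldl, pvAstep, hj] using ih 0 (lst2 ++ [nn]) le_rfl

-- invariant linking A's run list + counter to substring search in the row picture (n ≥ 1)
theorem pv_inv (n : Int) (hn : 1 ≤ n) (row : List Int) : ∀ (nn : Int) (lst2 : List Int), 0 ≤ nn →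
    ((row.foldl pvAstep (nn, lst2)).2 ++ [(row.foldl pvAstep (nn, lst2)).1]).any (fun j => decide (n ≤ j))
      = (lst2.any (fun j => decide (n ≤ j)) ||
         decide (List.replicate n.toNat '0' <:+: (List.replicate nn.toNat '0' ++ pvRowPic row))) := by
  induction row with
  | nil =>
    intro nn lst2 h
    have : (List.replicate n.toNat '0' <:+: (List.replicate nn.toNat '0' ++ pvRowPic [])) ↔ n ≤ nn := by
      simp only [pvRowPic, List.map_nil, List.append_nil, pv_rep_infix_rep]
      omega
    simp [this]
  | cons j row ih =>
    intro nn lst2 h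
    by_cases hj : j = 0
    · have hpic : List.replicate nn.toNat '0' ++ pvRowPic (j :: row)
          = List.replicate (nn + 1).toNat '0' ++ pvRowPic row := by
        have : (nn + 1).toNat = nn.toNat + 1 := by omega
        simp [pvRowPic, hj, this, List.replicate_succ']
      rw [show (j :: row).foldl pvAstep (nn, lst2) = row.foldl pvAstep (nn + 1, lst2) by
            simp [List.foldl, pvAstep, hj],
          ih (nn + 1) lst2 (by omega), hpic]
    · have hpic : List.replicate nn.toNat '0' ++ pvRowPic (j :: row)
          = List.replicate nn.toNat '0' ++ 'X' :: pvRowPic row := by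
        simp [pvRowPic, hj]
      rw [show (j :: row).foldl pvAstep (nn, lst2) = row.foldl pvAstep (0, lst2 ++ [nn]) by
            simp [List.foldl, pvAstep, hj],
          ih 0 (lst2 ++ [nn]) le_rfl, hpic]
      simp only [show (0 : Int).toNat = 0 from rfl, List.replicate_zero, List.nil_append]
      have hsplit := pv_rep_split n.toNat (by omega) (List.replicate nn.toNat '0') (pvRowPic row)
      have hrep : (List.replicate n.toNat '0' <:+: List.replicate nn.toNat '0') ↔ n ≤ nn := by
        rw [pv_rep_infix_rep]; omega
      simp only [List.any_append, List.any_cons, List.any_nil, Bool.or_false]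
      rw [Bool.or_assoc]
      congr 1
      rw [Bool.or_comm]
      have : decide (List.replicate n.toNat '0' <:+: List.replicate nn.toNat '0' ++ 'X' :: pvRowPic row)
          = (decide (n ≤ nn) || decide (List.replicate n.toNat '0' <:+: pvRowPic row)) := by
        rw [Bool.eq_iff_iff]
        simp [hsplit, hrep]
      rw [this, Bool.or_comm]

-- per row: A's run-list scan agrees with B's substring test
theorem pv_row_eq (row : List Int) (n : Int) :
    pvArowHit row n = pvBrowHit row n := by
  unfold pvBrowHit
  by_cases hn : 1 ≤ n
  · have h := pv_inv n hn row 0 [] le_rfl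
    unfold pvArowHit
    rw [h]
    rw [Bool.eq_iff_iff]
    simp only [List.any_nil, Bool.false_or, decide_eq_true_eq, Bool.and_eq_true,
      PySem.Chars.isIn_iff_infix, show (0 : Int).toNat = 0 from rfl, List.replicate_zero,
      List.nil_append]
    constructor
    · intro hinf
      have hl := hinf.sublist.length_le
      simp only [List.length_replicate, pvRowPic, List.length_map] at hl
      exact ⟨by omega, hinf⟩
    · exact And.right
  · -- n ≤ 0: A hits via the trailing nn ≥ 0 ≥ n; B's needle '0'*n is empty, found everywhere
    have hk : n.toNat = 0 := by omega
    have hA : pvArowHit row n = true := by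
      unfold pvArowHit
      simp only [List.any_append, List.any_cons, List.any_nil, Bool.or_false]
      have := pv_nn_nonneg row 0 [] le_rfl
      have : decide (n ≤ (row.foldl pvAstep (0, ([] : List Int))).1) = true := by
        simp; omega
      simp [this]
    have hlen : decide (n ≤ (row.length : Int)) = true := by simp; omega
    rw [hA, hk, List.replicate_zero, PySem.Chars.isIn_nil, hlen, Bool.true_and]

-- outer loop: A's indexed recursion vs B's findIdx?
theorem pv_go_eq (n : Int) (lst : List (List Int)) : ∀ (i : Int),
    pvAgo lst n i =
      (match lst.findIdx? (fun row => pvBrowHit row n) with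
       | some j => i + (j : Int) + 1
       | none => 0) := by
  induction lst with
  | nil => intro i; rfl
  | cons row rest ih =>
    intro i
    rw [List.findIdx?_cons]
    by_cases h : pvBrowHit row n = true
    · simp [pvAgo, pv_row_eq, h]
    · simp only [pvAgo, pv_row_eq, h, if_false, Bool.false_eq_true, ih (i + 1)]
      cases hf : rest.findIdx? (fun row => pvBrowHit row n) with
      | none => simp
      | some j => simp; ring

-- ===== VERDICT (by name: the statement is the Claim_ definition above) =====
theorem group_seats_spec : Claim_equal_group_seats := by
  intro lst n _
  unfold Spec_group_seats group_seats group_seats_alt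
  rw [pv_go_eq n lst 0]
  cases lst.findIdx? (fun row => pvBrowHit row n) with
  | none => rfl
  | some j => simp
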